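-- pv_equiv track=rewrite | github.com/mehiskasonen/iti0102-2022 | EX/ex05_hobbies/hobbies.py | create_dictionary_with_hobbies
-- ===== SOURCE A (Python) =====
-- def create_dictionary_with_hobbies(data: str) -> dict:
--     """
--     Create dictionary about hobbies and their hobbyists ie. {hobby1: [name1, name2, ...], hobby2: [...]}.
--
--     :param data: given string from database
--     :return: dictionary, where keys are hobbies and values are lists of people. Values are sorted alphabetically
--     """
--     result_dict = {}
--     split_data = list(subString.split(":") for subString in data.split("\n"))
--     for element in split_data:
--         key = element[1]
--         value = element[0]
--
--         if key in result_dict.keys() and value in result_dict.values():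
--             continue
--         if key in result_dict.keys() and value not in result_dict.values():
--             result_dict[key].append(value)
--         else:
--             result_dict[key] = [value]
--
--     for name, value in result_dict.items():
--         a = set(value)
--         b = list(sorted(a))
--         result_dict[name] = b
--
--     return result_dict
-- ===== SOURCE B (Python) =====
-- def create_dictionary_with_hobbies(data: str) -> dict:
--     """Group-by-filter: materialize the (name, hobby) pairs, list the hobbies in
--     first-appearance order, then build each hobby's value by filtering the pair
--     list — no dictionary is accumulated while scanning the data."""
--     pairs = [(line.split(":")[0], line.split(":")[1]) for line in data.split("\n")]
--     hobbies = []
--     for _, hobby in pairs: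
--         if hobby not in hobbies:
--             hobbies.append(hobby)
--     return {h: sorted({name for name, h2 in pairs if h2 == h}) for h in hobbies}
-- ===== Notes on version B (the rewrite author's own statement) =====
-- stated objective: alternative
-- what changed: B drops the dict accumulation entirely: it materializes the (name, hobby) pair list, computes the hobby order by ordered dedup, and builds each value by filtering the pairs per hobby (group-by-filter), replacing A's incremental dict with dead always-false membership branches plus a second dedup-and-sort rewrite loop.
import Mathlib
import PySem

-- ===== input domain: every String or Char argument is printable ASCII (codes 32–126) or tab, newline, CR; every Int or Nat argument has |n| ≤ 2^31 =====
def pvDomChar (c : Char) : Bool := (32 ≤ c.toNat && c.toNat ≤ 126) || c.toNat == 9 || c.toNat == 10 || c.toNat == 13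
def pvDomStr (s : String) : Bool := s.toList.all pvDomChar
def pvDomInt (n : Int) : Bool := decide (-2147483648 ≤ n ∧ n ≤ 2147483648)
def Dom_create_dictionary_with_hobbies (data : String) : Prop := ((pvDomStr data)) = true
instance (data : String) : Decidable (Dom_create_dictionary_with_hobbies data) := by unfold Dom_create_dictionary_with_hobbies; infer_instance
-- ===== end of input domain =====

-- B drops A's dict accumulation (with its dead always-false membership branches and second
-- dedup-and-sort rewrite loop) for group-by-filter over a materialized pair list; objective: alternative.

-- ===== PORT A =====
-- A's membership test of a str among the dict's list values compares str with list: always False in Python.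
def pyEqStrList (_value : String) (_l : List String) : Bool := false

def create_dictionary_with_hobbies (data : String) : List (String × List String) :=
  -- split with the non-empty literal separators "\n" / ":" always returns some; the [] default is never taken
  let split_data := ((PySem.Str.split? data "\n").getD []).map
      (fun subString => (PySem.Str.split? subString ":").getD [])
  let result_dict := split_data.foldl (fun d element =>
    let key := (PySem.List.pyGet? element 1).getD ""   -- element[1]; none = IndexError, excluded by Pre_
    let value := (PySem.List.pyGet? element 0).getD ""
    if d.contains key && d.values.any (fun w => pyEqStrList value w) then d
    else if d.contains key && !(d.values.any (fun w => pyEqStrList value w)) then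
      d.modify key [] (fun l => l ++ [value])          -- result_dict[key].append(value); key present here
    else d.insert key [value]) PySem.Dict.empty
  (result_dict.items.foldl (fun d p =>
      d.insert p.1 (PySem.List.sorted (PySem.Set.ofList p.2) (fun x => x) false)) result_dict).items

-- ===== PORT B =====
def create_dictionary_with_hobbies_alt (data : String) : List (String × List String) :=
  let pairs := ((PySem.Str.split? data "\n").getD []).map (fun line =>
      ((PySem.List.pyGet? ((PySem.Str.split? line ":").getD []) 0).getD "",
       (PySem.List.pyGet? ((PySem.Str.split? line ":").getD []) 1).getD ""))  -- [1]; none = IndexError, excluded by Pre_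
  let hobbies := pairs.foldl (fun hs p =>
      if hs.contains p.2 then hs else hs ++ [p.2]) ([] : List String)         -- if hobby not in hobbies: append
  hobbies.map (fun h =>
    (h, PySem.List.sorted
          (PySem.Set.ofList ((pairs.filter (fun q => q.2 == h)).map (fun q => q.1)))
          (fun x => x) false))                                                -- sorted({name for name, h2 in pairs if h2 == h})

-- ===== PRECONDITION & SPEC =====
-- Pre_ excludes exactly the inputs having a line without a colon separator, where the Python A
-- raises IndexError on element[1] (B raises there too, on parts[1]).
def Pre_create_dictionary_with_hobbies (data : String) : Prop :=
  ∀ line ∈ (PySem.Str.split? data "\n").getD [], PySem.Str.isIn ":" line = true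
instance (data : String) : Decidable (Pre_create_dictionary_with_hobbies data) := by
  unfold Pre_create_dictionary_with_hobbies; infer_instance
def pvWitness_create_dictionary_with_hobbies : String := "ann:ski\nbob:ski\nann:chess"

def Spec_create_dictionary_with_hobbies (data : String) (out : List (String × List String)) : Prop := out = create_dictionary_with_hobbies_alt data
instance (data : String) (out : List (String × List String)) : Decidable (Spec_create_dictionary_with_hobbies data out) := by unfold Spec_create_dictionary_with_hobbies; infer_instance

-- ===== CLAIM (what is proved, stated in full; the proofs are below) =====
def Claim_equal_create_dictionary_with_hobbies : Prop := ∀ (data : String), Dom_create_dictionary_with_hobbies data → Pre_create_dictionary_with_hobbies data → Spec_create_dictionary_with_hobbies data (create_dictionary_with_hobbies data)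

-- ===== LEMMAS AND PROOFS =====

-- proof-only names: hobby/name of a line, the sort applied to a value
def pvHobby (line : String) : String :=
  (PySem.List.pyGet? ((PySem.Str.split? line ":").getD []) 1).getD ""
def pvName (line : String) : String :=
  (PySem.List.pyGet? ((PySem.Str.split? line ":").getD []) 0).getD ""
def pvSortV (v : List String) : List String :=
  PySem.List.sorted (PySem.Set.ofList v) (fun x => x) false

-- A's first-loop body is exactly dict.modify (the str-in-values test is always false)
theorem stepA_eq_modify (d : PySem.Dict String (List String)) (element : List String) :
    (let key := (PySem.List.pyGet? element 1).getD ""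
     let value := (PySem.List.pyGet? element 0).getD ""
     if d.contains key && d.values.any (fun w => pyEqStrList value w) then d
     else if d.contains key && !(d.values.any (fun w => pyEqStrList value w)) then
       d.modify key [] (fun l => l ++ [value])
     else d.insert key [value])
    = d.modify ((PySem.List.pyGet? element 1).getD "") []
        (fun l => l ++ [(PySem.List.pyGet? element 0).getD ""]) := by
  by_cases hc : d.contains ((PySem.List.pyGet? element 1).getD "") = true
  · simp [pyEqStrList, hc]
  · simp only [Bool.not_eq_true] at hc
    simp [pyEqStrList, hc, PySem.Dict.modify, PySem.Dict.getD_of_not_contains d _ hc]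

-- A's second loop over result_dict.items() rewrites each value in place
theorem fold2_items :
    ∀ (l done : List (String × List String)) (d : PySem.Dict String (List String)),
    d.items = done ++ l → d.keys.Nodup →
    (l.foldl (fun d2 p => d2.insert p.1 (pvSortV p.2)) d).items
      = done ++ l.map (fun p => (p.1, pvSortV p.2)) := by
  intro l
  induction l with
  | nil => intro done d hd _; simpa using hd
  | cons p l' ih =>
    intro done d hd hnd
    have hp : p ∈ d.items := by rw [hd]; simp
    have hc : d.contains p.1 = true := by
      refine (PySem.Dict.contains_iff_mem_keys d p.1).mpr ?_
      simp only [PySem.Dict.keys, List.mem_map]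
      exact ⟨p, hp, rfl⟩
    have hkeys : (done.map Prod.fst ++ p.1 :: l'.map Prod.fst).Nodup := by
      have : d.keys = done.map Prod.fst ++ p.1 :: l'.map Prod.fst := by
        simp [PySem.Dict.keys, hd]
      rwa [this] at hnd
    have hdone : ∀ q ∈ done, q.1 ≠ p.1 := by
      intro q hq h
      exact (List.nodup_append.mp hkeys).2.2 q.1 (List.mem_map_of_mem hq) p.1 (by simp) h
    have hl' : ∀ q ∈ l', q.1 ≠ p.1 := by
      intro q hq h
      have h2 := (List.nodup_append.mp hkeys).2.1
      rw [List.nodup_cons] at h2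
      exact h2.1 (h ▸ List.mem_map_of_mem hq)
    have e1 : List.map (fun q => if (q.1 == p.1) = true then (p.1, pvSortV p.2) else q) done
        = done := by
      refine (List.map_congr_left fun q hq => ?_).trans (List.map_id done)
      simp [hdone q hq]
    have e2 : List.map (fun q => if (q.1 == p.1) = true then (p.1, pvSortV p.2) else q) l'
        = l' := by
      refine (List.map_congr_left fun q hq => ?_).trans (List.map_id l')
      simp [hl' q hq]
    have hitems : (d.insert p.1 (pvSortV p.2)).items = (done ++ [(p.1, pvSortV p.2)]) ++ l' := by
      rw [PySem.Dict.items_insert_of_contains d _ hc, hd, List.map_append, List.map_cons, e1, e2]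
      simp
    have hnd' : (d.insert p.1 (pvSortV p.2)).keys.Nodup :=
      PySem.Dict.nodup_keys_insert _ _ _ hnd
    rw [List.foldl_cons, ih (done ++ [(p.1, pvSortV p.2)]) _ hitems hnd']
    simp

-- both sides reduce to the same closed form over the line list
theorem pv_A_closed (lines : List String) :
    (let split_data := lines.map (fun s => (PySem.Str.split? s ":").getD [])
     let result_dict := split_data.foldl (fun d element =>
        let key := (PySem.List.pyGet? element 1).getD ""
        let value := (PySem.List.pyGet? element 0).getD ""
        if d.contains key && d.values.any (fun w => pyEqStrList value w) then d
        else if d.contains key && !(d.values.any (fun w => pyEqStrList value w)) then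
          d.modify key [] (fun l => l ++ [value])
        else d.insert key [value]) PySem.Dict.empty
     (result_dict.items.foldl (fun d p =>
        d.insert p.1 (pvSortV p.2)) result_dict).items)
    = (PySem.Set.ofList (lines.map pvHobby)).map (fun h =>
        (h, pvSortV ((lines.filter (fun l => pvHobby l == h)).map pvName))) := by
  have hstep : (lines.map (fun s => (PySem.Str.split? s ":").getD [])).foldl
      (fun d element =>
        let key := (PySem.List.pyGet? element 1).getD ""
        let value := (PySem.List.pyGet? element 0).getD ""
        if d.contains key && d.values.any (fun w => pyEqStrList value w) then d
        else if d.contains key && !(d.values.any (fun w => pyEqStrList value w)) then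
          d.modify key [] (fun l => l ++ [value])
        else d.insert key [value]) PySem.Dict.empty
      = (lines.map (fun l => (pvHobby l, pvName l))).foldl
          (fun d p => d.modify p.1 [] (fun v => v ++ [p.2])) PySem.Dict.empty := by
    rw [List.foldl_map, List.foldl_map]
    exact PySem.List.foldl_congr_mem _ _ _ _ (fun d l _ => stepA_eq_modify d _)
  simp only [hstep]
  set P := lines.map (fun l => (pvHobby l, pvName l)) with hP
  set dA := P.foldl (fun d p => d.modify p.1 [] (fun v => v ++ [p.2])) PySem.Dict.empty with hdA
  have hnd : dA.keys.Nodup := by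
    rw [hdA]
    exact PySem.Dict.nodup_keys_foldl_modify_key P Prod.fst [] _ _ PySem.Dict.nodup_keys_empty
  have hkeys : dA.keys = PySem.Set.ofList (lines.map pvHobby) := by
    rw [hdA, PySem.Dict.keys_foldl_modify_key]
    simp only [PySem.Dict.keys_empty, PySem.Set.update_nil_left, hP, List.map_map]
    rfl
  have hget : ∀ h, dA.getD h [] = (lines.filter (fun l => pvHobby l == h)).map pvName := by
    intro h
    rw [hdA, PySem.Dict.getD_foldl_modify_append, PySem.Dict.getD_empty, hP, List.filter_map]
    simp [List.map_map, Function.comp_def]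
  have hitems := PySem.Dict.items_eq_map_keys dA hnd []
  rw [fold2_items dA.items [] dA rfl hnd, List.nil_append, hitems, List.map_map, hkeys]
  refine List.map_congr_left fun h _ => ?_
  simp [hget h]

theorem pv_B_closed (lines : List String) :
    (let pairs := lines.map (fun line => (pvName line, pvHobby line))
     let hobbies := pairs.foldl (fun hs p =>
        if hs.contains p.2 then hs else hs ++ [p.2]) ([] : List String)
     hobbies.map (fun h =>
       (h, PySem.List.sorted
            (PySem.Set.ofList ((pairs.filter (fun q => q.2 == h)).map (fun q => q.1)))
            (fun x => x) false)))
    = (PySem.Set.ofList (lines.map pvHobby)).map (fun h =>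
        (h, pvSortV ((lines.filter (fun l => pvHobby l == h)).map pvName))) := by
  have hhob : (lines.map (fun line => (pvName line, pvHobby line))).foldl
      (fun hs p => if hs.contains p.2 then hs else hs ++ [p.2]) ([] : List String)
      = PySem.Set.ofList (lines.map pvHobby) := by
    rw [PySem.Set.ofList_eq_foldl, List.foldl_map, List.foldl_map]
    rfl
  simp only [hhob]
  refine List.map_congr_left fun h _ => ?_
  have hfilt : (lines.map (fun line => (pvName line, pvHobby line))).filter
      (fun q => q.2 == h) = (lines.filter (fun l => pvHobby l == h)).map
      (fun line => (pvName line, pvHobby line)) := by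
    rw [List.filter_map]
    rfl
  rw [hfilt, List.map_map]
  rfl

theorem pv_main (data : String) :
    create_dictionary_with_hobbies data = create_dictionary_with_hobbies_alt data := by
  unfold create_dictionary_with_hobbies create_dictionary_with_hobbies_alt
  rw [show (fun (d : PySem.Dict String (List String)) (p : String × List String) =>
        d.insert p.1 (PySem.List.sorted (PySem.Set.ofList p.2) (fun x => x) false))
      = (fun d p => d.insert p.1 (pvSortV p.2)) from rfl]
  rw [pv_A_closed ((PySem.Str.split? data "\n").getD [])]
  exact (pv_B_closed ((PySem.Str.split? data "\n").getD [])).symm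

-- ===== VERDICT (by name: the statement is the Claim_ definition above) =====
theorem create_dictionary_with_hobbies_spec : Claim_equal_create_dictionary_with_hobbies := by
  intro data _ _
  unfold Spec_create_dictionary_with_hobbies
  exact pv_main data
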